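-- pv_equiv track=rewrite | github.com/Hj9933/Coding-test-exercise | 프로그래머스/1/42840. 모의고사/모의고사.py | solution
-- ===== SOURCE A (Python) =====
-- def solution(answers):
--     n_prob = len(answers)
--     one_pattern = [1,2,3,4,5]
--     one = one_pattern*(n_prob//5)
--     if n_prob%5 != 0:
--         one.extend(one_pattern[:n_prob%5])
--     two_pattern = [2,1,2,3,2,4,2,5]
--     two = two_pattern*(n_prob//8)
--     if n_prob%8 != 0:
--         two.extend(two_pattern[:n_prob%8])
--     three_pattern = [3,3,1,1,2,2,4,4,5,5]
--     three = three_pattern*(n_prob//10)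
--     if n_prob%10 != 0:
--         three.extend(three_pattern[:n_prob%10])
--
--     cor_one = 0
--     for i in range(len(answers)):
--         if answers[i] == one[i]:
--             cor_one += 1
--     cor_two = 0
--     for i in range(len(answers)):
--         if answers[i] == two[i]:
--             cor_two += 1
--     cor_three = 0
--     for i in range(len(answers)):
--         if answers[i] == three[i]:
--             cor_three += 1
--     cor = [cor_one, cor_two, cor_three]
--     max_cor = max(cor)
--     answer = []
--     for i in range(3):
--         if cor[i] == max_cor:
--             answer.append(i+1)
--
--     return answer
-- ===== SOURCE B (Python) =====
-- def solution(answers):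
--     # Tally the answers into a histogram keyed by (position mod 40, value); 40 = lcm(5, 8, 10),
--     # so each pattern's score is a fixed 40-term lookup sum over its length-40 unrolled cycle.
--     hist = {}
--     for i, a in enumerate(answers):
--         key = (i % 40, a)
--         hist[key] = hist.get(key, 0) + 1
--     tables = [
--         [1, 2, 3, 4, 5] * 8,
--         [2, 1, 2, 3, 2, 4, 2, 5] * 5,
--         [3, 3, 1, 1, 2, 2, 4, 4, 5, 5] * 4,
--     ]
--     scores = [sum(hist.get((j, t[j]), 0) for j in range(40)) for t in tables]
--     best = max(scores)
--     return [k + 1 for k, s in enumerate(scores) if s == best]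
-- ===== Notes on version B (the rewrite author's own statement) =====
-- stated objective: alternative
-- what changed: B never compares answers against patterns while scanning: it tallies the answers once into a histogram keyed by (position mod 40, value) (40 = lcm of the three pattern periods) and then computes each pattern's score as a sum of 40 histogram lookups along its unrolled length-40 cycle, instead of A's three expanded answer sheets and three per-position comparison scans.
import Mathlib
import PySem

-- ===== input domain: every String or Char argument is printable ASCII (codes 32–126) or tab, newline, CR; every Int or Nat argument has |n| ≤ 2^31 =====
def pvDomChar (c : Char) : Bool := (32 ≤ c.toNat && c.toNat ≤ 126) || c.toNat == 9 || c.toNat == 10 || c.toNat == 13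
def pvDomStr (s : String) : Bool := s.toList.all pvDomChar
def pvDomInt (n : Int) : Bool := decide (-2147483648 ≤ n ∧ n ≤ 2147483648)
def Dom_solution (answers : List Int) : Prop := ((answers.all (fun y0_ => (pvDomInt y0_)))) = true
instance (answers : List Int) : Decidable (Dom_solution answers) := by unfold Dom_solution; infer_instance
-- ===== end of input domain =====

-- B replaces A's per-pattern comparison scans by a histogram: one tally of the answers keyed by
-- (position mod 40, value) — 40 = lcm of the pattern periods — then each score is a 40-term lookup
-- sum over the unrolled cycles (objective: alternative; same O(n) cost, different data structure).

-- ===== PORT A =====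
-- literal port of A: builds the three expanded answer sheets, counts each in its own loop over
-- range(len(answers)), then collects 1-based indices of the maximal count with an index loop.
-- (all list indexing is in range here, so pyGetD is exact; cor is a nonempty literal, so
--  Python's max(cor) is exactly (max? cor id).getD 0)
def solution (answers : List Int) : List Int :=
  let nProb : Int := answers.length
  let onePattern : List Int := [1, 2, 3, 4, 5]
  let one0 := List.flatten (List.replicate (PySem.Int.floordiv nProb 5).toNat onePattern)
  let one := if PySem.Int.mod nProb 5 ≠ 0 then
      one0 ++ PySem.List.slice onePattern none (some (PySem.Int.mod nProb 5)) else one0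
  let twoPattern : List Int := [2, 1, 2, 3, 2, 4, 2, 5]
  let two0 := List.flatten (List.replicate (PySem.Int.floordiv nProb 8).toNat twoPattern)
  let two := if PySem.Int.mod nProb 8 ≠ 0 then
      two0 ++ PySem.List.slice twoPattern none (some (PySem.Int.mod nProb 8)) else two0
  let threePattern : List Int := [3, 3, 1, 1, 2, 2, 4, 4, 5, 5]
  let three0 := List.flatten (List.replicate (PySem.Int.floordiv nProb 10).toNat threePattern)
  let three := if PySem.Int.mod nProb 10 ≠ 0 then
      three0 ++ PySem.List.slice threePattern none (some (PySem.Int.mod nProb 10)) else three0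
  let corOne := (PySem.List.pyRange 0 nProb).foldl
    (fun c i => if PySem.List.pyGetD answers i 0 == PySem.List.pyGetD one i 0 then c + 1 else c) (0 : Int)
  let corTwo := (PySem.List.pyRange 0 nProb).foldl
    (fun c i => if PySem.List.pyGetD answers i 0 == PySem.List.pyGetD two i 0 then c + 1 else c) (0 : Int)
  let corThree := (PySem.List.pyRange 0 nProb).foldl
    (fun c i => if PySem.List.pyGetD answers i 0 == PySem.List.pyGetD three i 0 then c + 1 else c) (0 : Int)
  let cor := [corOne, corTwo, corThree]
  let maxCor := (PySem.List.max? cor id).getD 0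
  (PySem.List.pyRange 0 3).foldl
    (fun acc i => if PySem.List.pyGetD cor i 0 == maxCor then acc ++ [i + 1] else acc) ([] : List Int)

-- ===== PORT B =====
-- literal port of B (Source B): one loop tallies hist[(i % 40, a)] += 1 into a dict; each pattern's
-- score is the sum of 40 histogram lookups along its length-40 unrolled cycle ([...]*8, *5, *4);
-- the result filters the enumerated scores. (scores is a nonempty literal, so max(scores) is
-- exactly (max? scores id).getD 0.)
def solution_alt (answers : List Int) : List Int :=
  let hist := (PySem.List.enumerate answers).foldl
    (fun d ia =>
      let key := (PySem.Int.mod ia.1 40, ia.2)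
      d.insert key (d.getD key 0 + 1))
    (PySem.Dict.empty : PySem.Dict (Int × Int) Int)
  let tables : List (List Int) :=
    [PySem.List.pyRepeat [1, 2, 3, 4, 5] 8,
     PySem.List.pyRepeat [2, 1, 2, 3, 2, 4, 2, 5] 5,
     PySem.List.pyRepeat [3, 3, 1, 1, 2, 2, 4, 4, 5, 5] 4]
  let scores := tables.map (fun t =>
    ((PySem.List.pyRange 0 40).map (fun j => hist.getD (j, PySem.List.pyGetD t j 0) 0)).sum)
  let best := (PySem.List.max? scores id).getD 0
  ((PySem.List.enumerate scores).filter (fun ks => ks.2 == best)).map (fun ks => ks.1 + 1)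

-- ===== PRECONDITION & SPEC =====
def Spec_solution (answers : List Int) (out : List Int) : Prop := out = solution_alt answers
instance (answers : List Int) (out : List Int) : Decidable (Spec_solution answers out) := by unfold Spec_solution; infer_instance

-- ===== CLAIM (what is proved, stated in full; the proofs are below) =====
def Claim_equal_solution : Prop := ∀ (answers : List Int), Dom_solution answers → Spec_solution answers (solution answers)

-- ===== LEMMAS AND PROOFS =====

-- indexing a flattened replication is indexing the pattern modulo its length
lemma getElem?_flatten_replicate {α : Type} (p : List α) (q j : ℕ) (hj : j < q * p.length) :
    (List.flatten (List.replicate q p))[j]? = p[j % p.length]? := by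
  induction q generalizing j with
  | zero => omega
  | succ q ih =>
    have hmul : (q + 1) * p.length = q * p.length + p.length := by ring
    rw [List.replicate_succ, List.flatten_cons, List.getElem?_append]
    by_cases h : j < p.length
    · rw [if_pos h, Nat.mod_eq_of_lt h]
    · rw [if_neg h, ih (j - p.length) (by omega),
        show j % p.length = (j - p.length) % p.length from Nat.mod_eq_sub_mod (by omega)]

-- indexing A's expanded sheet (full repetitions ++ partial prefix) at k < N
lemma getElem?_expand {α : Type} (p : List α) (hp : 0 < p.length) (N k : ℕ) (hk : k < N) :
    (List.flatten (List.replicate (N / p.length) p) ++ p.take (N % p.length))[k]? =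
      p[k % p.length]? := by
  rw [List.getElem?_append]
  rw [List.length_flatten, List.map_replicate, List.sum_replicate, smul_eq_mul]
  have hc : p.length * (N / p.length) = N / p.length * p.length := Nat.mul_comm _ _
  have hdm0 := Nat.div_add_mod N p.length
  have hml0 : N % p.length < p.length := Nat.mod_lt _ hp
  by_cases h : k < N / p.length * p.length
  · rw [if_pos h, getElem?_flatten_replicate p _ k h]
  · rw [if_neg h]
    have hlt : k - N / p.length * p.length < N % p.length := by
      have := Nat.div_add_mod N p.length
      omega
    have hmod : k % p.length = k - N / p.length * p.length := by
      have hdm := Nat.div_add_mod N p.length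
      have hmlt : N % p.length < p.length := Nat.mod_lt _ hp
      have hsm : (N / p.length + 1) * p.length = N / p.length * p.length + p.length := by ring
      have hq : k / p.length = N / p.length :=
        Nat.div_eq_of_lt_le (by omega) (by omega)
      have hk2 := Nat.div_add_mod k p.length
      rw [hq] at hk2
      omega
    rw [List.getElem?_take_of_lt hlt, hmod]

-- enumerate as a map over range
lemma enumerate_eq_map (xs : List Int) (s : Int) :
    PySem.List.enumerate xs s =
      (List.range xs.length).map (fun (k : ℕ) => (s + (k : Int), xs.getD k 0)) := by
  induction xs generalizing s with
  | nil => simp [PySem.List.enumerate_nil]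
  | cons x xs ih =>
    rw [PySem.List.enumerate_cons, ih, List.length_cons, List.range_succ_eq_map,
      List.map_cons, List.map_map]
    congr 1
    · simp
    · apply List.map_congr_left
      intro k _
      simp only [Function.comp_apply, Nat.succ_eq_add_one, List.getD_cons_succ,
        Prod.mk.injEq]
      exact ⟨by push_cast; ring, trivial⟩

-- A builds its expanded sheet with Int floordiv/mod and a conditional partial tail;
-- it is the flatten-replicate ++ take normal form over Nat
lemma build_expand (p : List Int) (N : ℕ) (MI : ℤ) (M : ℕ) (hMI : MI = (M : ℤ)) :
    (if PySem.Int.mod (N : ℤ) MI ≠ 0 then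
       List.flatten (List.replicate (PySem.Int.floordiv (N : ℤ) MI).toNat p) ++
         PySem.List.slice p none (some (PySem.Int.mod (N : ℤ) MI))
     else List.flatten (List.replicate (PySem.Int.floordiv (N : ℤ) MI).toNat p))
    = List.flatten (List.replicate (N / M) p) ++ p.take (N % M) := by
  subst hMI
  rw [PySem.Int.floordiv_natCast, PySem.Int.mod_natCast, Int.toNat_natCast]
  by_cases h : N % M = 0
  · simp [h]
  · rw [if_pos (by exact_mod_cast h), PySem.List.slice_to p (Int.natCast_nonneg _),
      Int.toNat_natCast]

-- A's counting scan of the expanded sheet = count over range with modular index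
lemma count_expand (p xs : List Int) (M : ℕ) (hM : p.length = M) (hp : 0 < M) :
    ((PySem.List.pyRange 0 (xs.length : Int)).foldl
      (fun c i => if PySem.List.pyGetD xs i 0 ==
          PySem.List.pyGetD
            (List.flatten (List.replicate (xs.length / M) p) ++ p.take (xs.length % M)) i 0
        then c + 1 else c) (0 : Int)) =
    ((List.countP (fun k => xs.getD k 0 == p.getD (k % M) 0) (List.range xs.length) : ℕ) : Int) := by
  subst hM
  rw [PySem.List.foldl_count_if, PySem.List.pyRange_one, List.countP_map, zero_add]
  have hlen : ((xs.length : ℤ) - 0).toNat = xs.length := by omega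
  rw [hlen]
  congr 1
  apply List.countP_congr
  intro k hk
  have hk' : k < xs.length := List.mem_range.mp hk
  have hexp : (List.flatten (List.replicate (xs.length / p.length) p) ++
      p.take (xs.length % p.length)).getD k 0 = p.getD (k % p.length) 0 := by
    rw [List.getD_eq_getElem?_getD, List.getD_eq_getElem?_getD,
      getElem?_expand p hp xs.length k hk']
  simp only [Function.comp_apply, zero_add, PySem.List.pyGetD_natCast, hexp]

-- B's tally loop (hist[key] = hist.get(key, 0) + 1 with a computed key) is the Counter of the
-- keyed list
lemma hist_eq (l : List (Int × Int)) :
    l.foldl (fun d ia =>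
        let key := (PySem.Int.mod ia.1 40, ia.2)
        d.insert key (d.getD key 0 + 1))
      (PySem.Dict.empty : PySem.Dict (Int × Int) Int)
    = PySem.Dict.counter (l.map (fun ia => (PySem.Int.mod ia.1 40, ia.2))) := by
  rw [← PySem.Dict.foldl_insert_getD_add_one_eq_counter, List.foldl_map]

-- exactly one j in range 40 has the right residue, so the 40-way countP collapses to one test
lemma countP_range_pair (r : ℕ) (hr : r < 40) (a : Int) (v : ℕ → Int) :
    (List.range 40).countP (fun j : ℕ => (((r : ℕ) : ℤ), a) == (((j : ℕ) : ℤ), v j)) =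
      if a == v r then 1 else 0 := by
  have hpt : ∀ j : ℕ, ((((r : ℕ) : ℤ), a) == (((j : ℕ) : ℤ), v j)) = ((j == r) && (a == v r)) := by
    intro j
    by_cases h : j = r
    · subst h; simp
    · have h1 : (((r : ℕ) : ℤ) == ((j : ℕ) : ℤ)) = false := by
        simp only [beq_eq_false_iff_ne, ne_eq, Nat.cast_inj]
        exact Ne.symm h
      have h2 : (j == r) = false := by simp [h]
      rw [show ((((r : ℕ) : ℤ), a) == (((j : ℕ) : ℤ), v j))
          = ((((r : ℕ) : ℤ) == ((j : ℕ) : ℤ)) && (a == v j)) from rfl,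
        h1, h2, Bool.false_and, Bool.false_and]
  rw [List.countP_congr (fun j _ => by rw [hpt j])]
  by_cases h : (a == v r) = true
  · rw [if_pos h]
    simp only [h, Bool.and_true]
    rw [show (fun j : ℕ => j == r) = (· == r) from rfl, ← List.count, List.count_range, if_pos hr]
  · rw [if_neg h]
    simp [Bool.eq_false_iff.mpr h]

-- the histogram-lookup sum along a length-40 cycle counts the modular matches
lemma sum_count_mod (v g : ℕ → Int) (l : List ℕ) :
    ((List.range 40).map (fun j =>
        ((List.count (((j : ℕ) : ℤ), v j)
          (l.map (fun k => (((k % 40 : ℕ) : ℤ), g k)))) : ℤ))).sum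
    = ((l.countP (fun k => g k == v (k % 40)) : ℕ) : ℤ) := by
  induction l with
  | nil => simp
  | cons k l ih =>
    rw [List.map_cons]
    have hcc : ∀ j : ℕ, (List.count (((j : ℕ) : ℤ), v j)
        ((((k % 40 : ℕ) : ℤ), g k) :: l.map (fun k => (((k % 40 : ℕ) : ℤ), g k))) : ℤ)
        = (List.count (((j : ℕ) : ℤ), v j) (l.map (fun k => (((k % 40 : ℕ) : ℤ), g k))) : ℤ)
          + (if ((((k % 40 : ℕ) : ℤ), g k) == (((j : ℕ) : ℤ), v j)) then (1 : ℤ) else 0) := by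
      intro j
      rw [List.count_cons]
      push_cast
      split_ifs <;> simp
    rw [List.map_congr_left (fun j _ => hcc j), PySem.List.sum_map_add_int, ih,
      PySem.List.sum_map_ite_one_zero, countP_range_pair (k % 40) (Nat.mod_lt _ (by omega)) (g k) v,
      List.countP_cons]
    push_cast
    ring

-- one pattern's score in B (sum of 40 histogram lookups along its unrolled cycle) equals the
-- modular match count that A's scan computes
lemma score_eq (answers p t40 : List Int) (m : ℕ) (hm : m ∣ 40)
    (ht : ∀ j : ℕ, j < 40 → t40.getD j 0 = p.getD (j % m) 0) :
    ((PySem.List.pyRange 0 40).map (fun j =>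
        (PySem.Dict.counter ((PySem.List.enumerate answers).map
            (fun ia => (PySem.Int.mod ia.1 40, ia.2)))).getD (j, PySem.List.pyGetD t40 j 0) 0)).sum
    = ((List.countP (fun k => answers.getD k 0 == p.getD (k % m) 0)
        (List.range answers.length) : ℕ) : ℤ) := by
  have h40 : (40 : ℤ) = ((40 : ℕ) : ℤ) := by norm_num
  rw [enumerate_eq_map answers 0, List.map_map]
  have hmap : ((fun ia : ℤ × ℤ => (PySem.Int.mod ia.1 40, ia.2)) ∘
      fun k : ℕ => ((0 : ℤ) + (k : ℤ), answers.getD k 0))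
      = fun k : ℕ => (((k % 40 : ℕ) : ℤ), answers.getD k 0) := by
    funext k
    simp only [Function.comp_apply, zero_add]
    rw [h40, PySem.Int.mod_natCast]
  rw [hmap, h40, PySem.List.pyRange_zero_natCast, List.map_map]
  have hbody : ∀ j ∈ List.range 40,
      ((fun j : ℤ =>
        (PySem.Dict.counter ((List.range answers.length).map
            (fun k : ℕ => (((k % 40 : ℕ) : ℤ), answers.getD k 0)))).getD
          (j, PySem.List.pyGetD t40 j 0) 0) ∘ fun k : ℕ => ((k : ℕ) : ℤ)) j
      = ((List.count (((j : ℕ) : ℤ), t40.getD j 0)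
          ((List.range answers.length).map
            (fun k : ℕ => (((k % 40 : ℕ) : ℤ), answers.getD k 0)))) : ℤ) := by
    intro j _
    simp only [Function.comp_apply]
    rw [PySem.List.pyGetD_natCast, PySem.Dict.getD_counter]
  rw [List.map_congr_left hbody, sum_count_mod (fun j => t40.getD j 0) (fun k => answers.getD k 0)]
  congr 1
  apply List.countP_congr
  intro k _
  rw [ht (k % 40) (Nat.mod_lt _ (by omega)), Nat.mod_mod_of_dvd k hm]

-- the final selection: A's index loop over the 3-list with append = B's filter-map over the
-- enumerated 3-list, for any threshold M
lemma select_eq (a b c M : Int) :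
    (PySem.List.pyRange 0 3).foldl
      (fun acc i => if PySem.List.pyGetD [a, b, c] i 0 == M then acc ++ [i + 1] else acc)
      ([] : List Int)
    = ((PySem.List.enumerate [a, b, c]).filter (fun ks => ks.2 == M)).map (fun ks => ks.1 + 1) := by
  have hr : PySem.List.pyRange 0 3 = [0, 1, 2] := by decide
  have g0 : PySem.List.pyGetD [a, b, c] (0 : ℤ) 0 = a := by simp [PySem.List.pyGetD]
  have g1 : PySem.List.pyGetD [a, b, c] (1 : ℤ) 0 = b := by simp [PySem.List.pyGetD]
  have g2 : PySem.List.pyGetD [a, b, c] (2 : ℤ) 0 = c := by simp [PySem.List.pyGetD]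
  rw [hr]
  simp only [List.foldl_cons, List.foldl_nil, PySem.List.enumerate_cons,
    PySem.List.enumerate_nil, List.filter_cons, List.filter_nil, g0, g1, g2]
  split_ifs <;> norm_num

-- ===== VERDICT (by name: the statement is the Claim_ definition above) =====
theorem solution_spec : Claim_equal_solution := by
  intro answers _
  show solution answers = solution_alt answers
  unfold solution solution_alt
  dsimp only
  rw [hist_eq]
  rw [build_expand [1,2,3,4,5] answers.length 5 5 (by norm_num),
    build_expand [2,1,2,3,2,4,2,5] answers.length 8 8 (by norm_num),
    build_expand [3,3,1,1,2,2,4,4,5,5] answers.length 10 10 (by norm_num),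
    count_expand [1,2,3,4,5] answers 5 rfl (by norm_num),
    count_expand [2,1,2,3,2,4,2,5] answers 8 rfl (by norm_num),
    count_expand [3,3,1,1,2,2,4,4,5,5] answers 10 rfl (by norm_num)]
  rw [List.map_cons, List.map_cons, List.map_cons, List.map_nil]
  rw [score_eq answers [1,2,3,4,5] (PySem.List.pyRepeat [1,2,3,4,5] 8) 5
      (by norm_num) (by decide),
    score_eq answers [2,1,2,3,2,4,2,5] (PySem.List.pyRepeat [2,1,2,3,2,4,2,5] 5) 8
      (by norm_num) (by decide),
    score_eq answers [3,3,1,1,2,2,4,4,5,5] (PySem.List.pyRepeat [3,3,1,1,2,2,4,4,5,5] 4) 10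
      (by norm_num) (by decide)]
  exact select_eq _ _ _ _
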